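-- pv_equiv track=rewrite | github.com/levani-b/leetcode-solutions | LC-3833-CountDominantIndices.py | dominantIndices
-- ===== SOURCE A (Python) =====
-- from typing import List
--
-- def dominantIndices(nums: List[int]) -> int:
--     n = len(nums)
--     count = 0
--
--     for i in range(n - 1):
--         right_sum = sum(nums[i + 1:])
--         right_count = n - i - 1
--
--         if nums[i] * right_count > right_sum:
--             count += 1
--
--     return count
-- ===== SOURCE B (Python) =====
-- def dominantIndices(nums):
--     count = 0
--     suffix_sum = 0
--     suffix_len = 0
--     for x in reversed(nums):
--         if suffix_len > 0 and x * suffix_len > suffix_sum: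
--             count += 1
--         suffix_sum += x
--         suffix_len += 1
--     return count
-- ===== Notes on version B (the rewrite author's own statement) =====
-- stated objective: faster
-- what changed: Replaces the per-index re-summation of the right slice (sum(nums[i+1:]) inside the loop) by a single reverse pass that maintains a running suffix sum and suffix length.
import Mathlib
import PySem

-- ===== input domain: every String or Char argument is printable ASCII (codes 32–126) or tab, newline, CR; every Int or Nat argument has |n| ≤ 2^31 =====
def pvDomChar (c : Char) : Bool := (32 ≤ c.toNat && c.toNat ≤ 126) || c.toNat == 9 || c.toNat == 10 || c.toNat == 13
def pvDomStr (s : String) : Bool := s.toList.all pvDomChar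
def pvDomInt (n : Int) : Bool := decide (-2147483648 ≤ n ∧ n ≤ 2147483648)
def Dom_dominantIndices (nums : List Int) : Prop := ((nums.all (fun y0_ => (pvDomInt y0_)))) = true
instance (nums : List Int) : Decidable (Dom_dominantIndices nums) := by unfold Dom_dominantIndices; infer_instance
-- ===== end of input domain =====

-- B replaces A's per-index slice re-summation by one reverse pass keeping a running suffix sum (objective: faster).

-- ===== PORT A =====
-- loop body of A: for index i, right_sum = sum(nums[i+1:]), right_count = n - i - 1
def stepA (nums : List Int) (n : Int) (count : Int) (i : Int) : Int :=
  let right_sum := (PySem.List.slice nums (some (i + 1)) none).sum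
  let right_count := n - i - 1
  if PySem.List.pyGetD nums i 0 * right_count > right_sum then count + 1 else count

def dominantIndices (nums : List Int) : Int :=
  let n := PySem.List.len nums
  (PySem.List.pyRange 0 (n - 1) 1).foldl (stepA nums n) 0

-- ===== PORT B =====
-- loop body of B: state (count, suffix_sum, suffix_len), one element of reversed(nums) at a time
def stepB (st : Int × Int × Int) (x : Int) : Int × Int × Int :=
  ((if 0 < st.2.2 ∧ x * st.2.2 > st.2.1 then st.1 + 1 else st.1), st.2.1 + x, st.2.2 + 1)

def dominantIndices_alt (nums : List Int) : Int :=
  (nums.reverse.foldl stepB (0, 0, 0)).1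

-- ===== PRECONDITION & SPEC =====
def Spec_dominantIndices (nums : List Int) (out : Int) : Prop := out = dominantIndices_alt nums
instance (nums : List Int) (out : Int) : Decidable (Spec_dominantIndices nums out) := by unfold Spec_dominantIndices; infer_instance

-- ===== CLAIM (what is proved, stated in full; the proofs are below) =====
def Claim_equal_dominantIndices : Prop := ∀ (nums : List Int), Dom_dominantIndices nums → Spec_dominantIndices nums (dominantIndices nums)

-- ===== LEMMAS AND PROOFS =====

-- the 0/1 contribution of index i in A's loop
def gA (nums : List Int) (n : Int) (i : Int) : Int :=
  if PySem.List.pyGetD nums i 0 * (n - i - 1) > (PySem.List.slice nums (some (i + 1)) none).sum then 1 else 0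

lemma stepA_eq_add (nums : List Int) (n : Int) :
    stepA nums n = fun c i => c + gA nums n i := by
  funext c i
  simp only [stepA, gA]
  split_ifs <;> ring

lemma A_as_sum (nums : List Int) :
    dominantIndices nums =
      ((PySem.List.pyRange 0 (PySem.List.len nums - 1) 1).map
        (gA nums (PySem.List.len nums))).sum := by
  simp only [dominantIndices, stepA_eq_add, PySem.List.foldl_add, zero_add]

-- invariant of B's reverse pass
lemma B_inv (xs : List Int) :
    xs.reverse.foldl stepB (0, 0, 0) =
      (dominantIndices_alt xs, xs.sum, (xs.length : Int)) := by
  induction xs with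
  | nil => simp [dominantIndices_alt]
  | cons x xs ih =>
      have : (x :: xs).reverse = xs.reverse ++ [x] := by simp
      rw [dominantIndices_alt, this, List.foldl_append, ih]
      simp [stepB]
      ring

lemma B_cons (x : Int) (xs : List Int) :
    dominantIndices_alt (x :: xs) =
      if 0 < (xs.length : Int) ∧ x * (xs.length : Int) > xs.sum
      then dominantIndices_alt xs + 1 else dominantIndices_alt xs := by
  have h : (x :: xs).reverse = xs.reverse ++ [x] := by simp
  rw [dominantIndices_alt, h, List.foldl_append, B_inv]
  simp [stepB]

-- index shift: the contributions of indices 1..m of (x::xs) are those of indices 0..m-1 of xs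
lemma shift_map (x : Int) (xs : List Int) :
    (PySem.List.pyRange 1 (xs.length : Int) 1).map (gA (x :: xs) ((xs.length : Int) + 1)) =
    (PySem.List.pyRange 0 ((xs.length : Int) - 1) 1).map (gA xs (xs.length : Int)) := by
  rw [PySem.List.pyRange_one, PySem.List.pyRange_one, List.map_map, List.map_map]
  have hlen : ((xs.length : Int) - 1).toNat = ((xs.length : Int) - 1 - 0).toNat := by omega
  rw [← hlen]
  apply List.map_congr_left
  intro k _
  simp only [Function.comp_apply, gA, zero_add]
  have h1 : (1 : Int) + (k : Int) = ((k + 1 : Nat) : Int) := by push_cast; ring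
  rw [h1]
  have h2 : ((k + 1 : Nat) : Int) + 1 = ((k + 2 : Nat) : Int) := by push_cast; ring
  rw [h2]
  have h3 : (k : Int) + 1 = ((k + 1 : Nat) : Int) := by push_cast; ring
  rw [h3, PySem.List.pyGetD_natCast, PySem.List.pyGetD_natCast,
      PySem.List.slice_from _ (by positivity), PySem.List.slice_from _ (by positivity)]
  have h8 : (xs.length : Int) + 1 - ((k + 1 : Nat) : Int) - 1 = (xs.length : Int) - (k : Int) - 1 := by
    push_cast; ring
  rw [h8]
  have h4 : ((k + 2 : Nat) : Int).toNat = k + 2 := by omega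
  have h5 : ((k + 1 : Nat) : Int).toNat = k + 1 := by omega
  rw [h4, h5]
  have h6 : List.drop (k + 2) (x :: xs) = List.drop (k + 1) xs := by
    simp [List.drop_succ_cons]
  rw [h6]
  have h7 : (x :: xs).getD (k + 1) 0 = xs.getD k 0 := by simp [List.getD]
  rw [h7]

lemma A_eq_B (nums : List Int) : dominantIndices nums = dominantIndices_alt nums := by
  induction nums with
  | nil => decide
  | cons x xs ih =>
      rw [A_as_sum, B_cons]
      rcases xs with _ | ⟨y, ys⟩
      · simp [PySem.List.pyRange]
        decide
      · set xs := y :: ys with hxs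
        have hm : 0 < (xs.length : Int) := by simp [hxs]
        have hlen : PySem.List.len (x :: xs) = (xs.length : Int) + 1 := by
          simp [PySem.List.len_eq]
        rw [hlen]
        have hstep : (PySem.List.pyRange 0 ((xs.length : Int) + 1 - 1) 1) =
            0 :: PySem.List.pyRange 1 (xs.length : Int) 1 := by
          have : (xs.length : Int) + 1 - 1 = (xs.length : Int) := by ring
          rw [this, PySem.List.pyRange_one_cons hm]
          norm_num
        rw [hstep, List.map_cons, List.sum_cons, shift_map]
        have htail : ((PySem.List.pyRange 0 ((xs.length : Int) - 1) 1).map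
            (gA xs (xs.length : Int))).sum = dominantIndices_alt xs := by
          rw [← ih, A_as_sum, PySem.List.len_eq]
        rw [htail]
        have hhead : gA (x :: xs) ((xs.length : Int) + 1) 0 =
            if x * (xs.length : Int) > xs.sum then 1 else 0 := by
          simp only [gA]
          rw [show (0 : Int) + 1 = ((1 : Nat) : Int) by norm_num,
              PySem.List.slice_from _ (by positivity)]
          simp [PySem.List.pyGetD]
        rw [hhead]
        split_ifs with h1 h2 h3
        · ring
        · exact absurd ⟨hm, h1⟩ h2
        · exact absurd h3.2 h1
        · ring

-- ===== VERDICT (by name: the statement is the Claim_ definition above) =====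
theorem dominantIndices_spec : Claim_equal_dominantIndices := by
  intro nums _
  unfold Spec_dominantIndices
  exact A_eq_B nums
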